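-- pv_equiv track=rewrite | github.com/pypi-data/pypi-mirror-402 | packages/agentbox-python-sdk/agentbox_python_sdk-1.0.9-py3-none-any.whl/agentbox/sandbox/output_utils.py | strip_echo_and_prompt
-- ===== SOURCE A (Python) =====
-- def strip_echo_and_prompt(full_output: str) -> str:
--     """
--     简单去掉回显：找到第一行命令本身，然后把它以及之前的 prompt 去掉。
--     """
--     lines = full_output.splitlines()
--     new_lines = []
--     started = False
--     for line in lines:
--         if not started and "__CMD_DONE__" in line:
--             continue
--         # 找到命令行本身，之后开始收集
--         if not started and "__CMD_DONE__" not in line and line.strip() != "":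
--             started = True
--             new_lines.append(line)
--             continue  # 跳过回显行
--         if started:
--             if "__CMD_DONE__" in line:
--                 break
--         new_lines.append(line)
--
--     if new_lines and new_lines[0].strip() == "":
--         new_lines = new_lines[1:]
--
--     return '\n'.join(new_lines)
-- ===== SOURCE B (Python) =====
-- def strip_echo_and_prompt(full_output: str) -> str:
--     lines = full_output.splitlines()
--     start = next((i for i, l in enumerate(lines)
--                   if "__CMD_DONE__" not in l and l.strip() != ""), None)
--     if start is None:
--         out = [l for l in lines if "__CMD_DONE__" not in l]
--     else:
--         pre = [l for l in lines[:start] if "__CMD_DONE__" not in l]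
--         j = next((k for k in range(start, len(lines))
--                   if "__CMD_DONE__" in lines[k]), len(lines))
--         out = pre + lines[start:j]
--     if out and out[0].strip() == "":
--         out = out[1:]
--     return '\n'.join(out)
-- ===== Notes on version B (the rewrite author's own statement) =====
-- stated objective: simpler
-- what changed: Replaces A's single stateful loop (started flag, continue/break) by a direct decomposition: find the first non-blank non-marker line, filter the pre-start blanks, slice up to the first done-marker line, then drop one leading blank.
import Mathlib
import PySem

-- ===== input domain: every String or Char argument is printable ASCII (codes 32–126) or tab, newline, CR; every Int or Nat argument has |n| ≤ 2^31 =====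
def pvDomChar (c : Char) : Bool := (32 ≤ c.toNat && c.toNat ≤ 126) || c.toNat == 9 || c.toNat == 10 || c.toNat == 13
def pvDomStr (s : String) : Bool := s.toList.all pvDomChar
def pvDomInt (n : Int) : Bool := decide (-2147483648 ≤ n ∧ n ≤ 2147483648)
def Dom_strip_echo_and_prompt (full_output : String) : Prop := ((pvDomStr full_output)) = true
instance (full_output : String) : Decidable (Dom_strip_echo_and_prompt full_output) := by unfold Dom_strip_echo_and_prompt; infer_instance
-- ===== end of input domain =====

-- B replaces A's stateful started-flag loop by a direct decomposition (find start line,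
-- collect pre-start blanks, slice up to the first marker line); objective: simpler. Same results.

-- ===== PORT A =====
-- '"__CMD_DONE__" in line'
def pvHasDone (line : String) : Bool := PySem.Str.isIn "__CMD_DONE__" line

-- the for-loop of A, with its early 'break'; state = started flag
def pvALoop (lines : List String) (started : Bool) : List String :=
  match lines with
  | [] => []
  | line :: rest =>
    if !started && pvHasDone line then
      pvALoop rest started
    else if !started && !pvHasDone line && PySem.Str.strip line ≠ "" then
      line :: pvALoop rest true
    else if started && pvHasDone line then
      []
    else
      line :: pvALoop rest started

def strip_echo_and_prompt (full_output : String) : String :=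
  let lines := PySem.Str.splitlines full_output
  let new_lines := pvALoop lines false
  let new_lines :=
    match new_lines with
    | h :: t => if PySem.Str.strip h = "" then t else h :: t
    | [] => []
  PySem.Str.join "\n" new_lines

-- ===== PORT B =====
-- first line that is non-blank and free of the marker
def pvIsStart (line : String) : Bool := !pvHasDone line && PySem.Str.strip line ≠ ""

-- B's core: pre-start blanks (marker lines dropped) ++ lines[start:j]
def pvBCore (lines : List String) : List String :=
  match lines.findIdx? pvIsStart with
  | none => lines.filter (fun l => !pvHasDone l)
  | some start =>
    let pre := (lines.take start).filter (fun l => !pvHasDone l)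
    let tail := lines.drop start
    let j := match tail.findIdx? pvHasDone with
             | none => tail.length
             | some k => k
    pre ++ tail.take j

def strip_echo_and_prompt_alt (full_output : String) : String :=
  let out := pvBCore (PySem.Str.splitlines full_output)
  let out :=
    match out with
    | h :: t => if PySem.Str.strip h = "" then t else h :: t
    | [] => []
  PySem.Str.join "\n" out

-- ===== PRECONDITION & SPEC =====
def Spec_strip_echo_and_prompt (full_output : String) (out : String) : Prop := out = strip_echo_and_prompt_alt full_output
instance (full_output : String) (out : String) : Decidable (Spec_strip_echo_and_prompt full_output out) := by unfold Spec_strip_echo_and_prompt; infer_instance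

-- ===== CLAIM (what is proved, stated in full; the proofs are below) =====
def Claim_equal_strip_echo_and_prompt : Prop := ∀ (full_output : String), Dom_strip_echo_and_prompt full_output → Spec_strip_echo_and_prompt full_output (strip_echo_and_prompt full_output)

-- ===== LEMMAS AND PROOFS =====

-- once started, A collects lines up to (excluding) the first marker line
theorem pvALoop_true (lines : List String) :
    pvALoop lines true = lines.takeWhile (fun l => !pvHasDone l) := by
  induction lines with
  | nil => rfl
  | cons l rest ih =>
    by_cases h : pvHasDone l = true <;>
      simp [pvALoop, h, ih]

-- taking up to the first marker index is takeWhile on its negation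
theorem pvTake_firstDone (xs : List String) :
    xs.take (match xs.findIdx? pvHasDone with
             | none => xs.length
             | some k => k) = xs.takeWhile (fun l => !pvHasDone l) := by
  induction xs with
  | nil => rfl
  | cons l rest ih =>
    by_cases h : pvHasDone l = true
    · simp [List.findIdx?_cons, h]
    · simp only [List.findIdx?_cons, h, if_neg, Bool.false_eq_true, not_false_iff,
        List.takeWhile_cons, Bool.not_false, if_true]
      cases hf : rest.findIdx? pvHasDone with
      | none => simpa [hf] using ih
      | some k => simpa [hf] using ih

-- A's loop from the unstarted state computes B's decomposition
theorem pvALoop_false_eq (lines : List String) :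
    pvALoop lines false = pvBCore lines := by
  induction lines with
  | nil => rfl
  | cons l rest ih =>
    by_cases hd : pvHasDone l = true
    · -- marker line before start: skipped by A, dropped by B
      have hs : pvIsStart l = false := by simp [pvIsStart, hd]
      rw [pvBCore] at ih ⊢
      simp only [pvALoop, hd, Bool.not_true, List.findIdx?_cons, hs,
        Bool.false_eq_true, if_false]
      cases hf : rest.findIdx? pvIsStart with
      | none => simpa [hf, hd] using ih
      | some k => simpa [hf, hd] using ih
    · by_cases hb : PySem.Str.strip l = ""
      · -- pre-start blank line: kept by both, stay unstarted
        have hs : pvIsStart l = false := by simp [pvIsStart, hb]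
        rw [pvBCore] at ih ⊢
        simp only [pvALoop, hd, Bool.not_false, Bool.and_true, hb, ne_eq,
          not_true_eq_false, decide_false, Bool.and_false, Bool.false_eq_true, if_false,
          List.findIdx?_cons, hs]
        cases hf : rest.findIdx? pvIsStart with
        | none => simpa [hf, hd] using ih
        | some k => simpa [hf, hd] using ih
      · -- the command line: start here
        have hs : pvIsStart l = true := by simp [pvIsStart, hd, hb]
        simp only [pvALoop, hd, Bool.not_false, Bool.and_true, hb, ne_eq,
          not_false_iff, decide_true, Bool.false_eq_true, if_false, if_true, pvBCore,
          List.findIdx?_cons, hs, List.take_zero, List.filter_nil, List.drop_zero,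
          List.nil_append]
        rw [pvALoop_true]
        have h2 := pvTake_firstDone rest
        cases hf : rest.findIdx? pvHasDone with
        | none => rw [hf] at h2; simp [← h2, List.take_succ_cons]
        | some k => rw [hf] at h2; simp [← h2, List.take_succ_cons]

-- ===== VERDICT (by name: the statement is the Claim_ definition above) =====
theorem strip_echo_and_prompt_spec : Claim_equal_strip_echo_and_prompt := by
  intro full_output _
  simp only [Spec_strip_echo_and_prompt, strip_echo_and_prompt, strip_echo_and_prompt_alt,
    pvALoop_false_eq]
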